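-- pv_equiv track=rewrite | github.com/miliar/Code_Jam_Webscraper | solutions_python/solutions_year10_round3_nr2/93.py | getMinimumTestCnt
-- ===== SOURCE A (Python) =====
-- def getMinimumTestCnt(lower, upper, factor):
-- 	if (lower*factor) >= upper:
-- 		return 0
-- 	a = lower
-- 	while a < upper:
-- 		a = a * factor
-- 		tmp = upper // factor
-- 		if (upper % factor) > 0:
-- 			tmp = tmp + 1
-- 		upper = tmp
-- 	cnt = getMinimumTestCnt(lower, a, factor)
-- 	return cnt + 1
-- ===== SOURCE B (Python) =====
-- def getMinimumTestCnt(lower, upper, factor):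
--     # k = minimal number of multiplications by factor taking lower to >= upper
--     k = 0
--     a = lower
--     while a < upper:
--         a = a * factor
--         k = k + 1
--     # each round of tests ceil-halves k; count rounds until k <= 1
--     cnt = 0
--     while k > 1:
--         k = (k + 1) // 2
--         cnt = cnt + 1
--     return cnt
-- ===== Notes on version B (the rewrite author's own statement) =====
-- stated objective: alternative
-- what changed: B replaces A's recursive squeeze (repeatedly growing a and ceil-shrinking upper, then recursing on the meeting point) by two flat loops: first count k, the minimal number of multiplications by factor taking lower to >= upper, then count how many times k must be ceil-halved to reach <= 1; that count is the answer.
-- outside the precondition, e.g. on getMinimumTestCnt(1, 5, 0): A raises ZeroDivisionError, B does not finish within the time limit; on getMinimumTestCnt(2, 5, -2): A returns 2, B returns 1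
import Mathlib
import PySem

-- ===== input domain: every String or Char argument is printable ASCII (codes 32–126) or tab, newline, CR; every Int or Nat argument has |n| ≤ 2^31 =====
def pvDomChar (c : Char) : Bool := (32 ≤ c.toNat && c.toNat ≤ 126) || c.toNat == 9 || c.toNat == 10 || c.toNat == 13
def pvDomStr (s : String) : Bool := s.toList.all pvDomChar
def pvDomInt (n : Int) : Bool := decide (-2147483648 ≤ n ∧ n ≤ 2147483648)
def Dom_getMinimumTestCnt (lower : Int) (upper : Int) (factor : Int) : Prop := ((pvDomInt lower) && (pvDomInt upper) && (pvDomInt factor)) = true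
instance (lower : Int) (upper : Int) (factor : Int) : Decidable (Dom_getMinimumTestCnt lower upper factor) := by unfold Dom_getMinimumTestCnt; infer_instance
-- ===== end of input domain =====

-- B is a different algorithm: instead of A's recursive squeeze, it counts k = minimal
-- multiplications by factor taking lower to >= upper, then returns the number of ceil-halvings
-- bringing k down to <= 1 (objective: alternative; same asymptotic cost).
-- Loops are ported with a fuel parameter (100), ample on Dom under Pre; fuel only makes the same computation total.


-- ===== PORT A =====
-- inner `while a < upper` loop of A (fueled; returns the final (a, upper))
def pvInnerA (fuel : Nat) (a : Int) (upper : Int) (factor : Int) : Int × Int :=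
  match fuel with
  | 0 => (a, upper)
  | fuel + 1 =>
    if a < upper then
      let a' := a * factor
      let tmp := PySem.Int.floordiv upper factor
      let tmp := if PySem.Int.mod upper factor > 0 then tmp + 1 else tmp
      pvInnerA fuel a' tmp factor
    else (a, upper)

-- A's recursion (fueled)
def pvRecA (fuel : Nat) (lower : Int) (upper : Int) (factor : Int) : Int :=
  match fuel with
  | 0 => 0
  | fuel + 1 =>
    if lower * factor ≥ upper then 0
    else
      let (a, _) := pvInnerA 100 lower upper factor
      pvRecA fuel lower a factor + 1

def getMinimumTestCnt (lower : Int) (upper : Int) (factor : Int) : Int :=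
  pvRecA 100 lower upper factor

-- ===== PORT B =====
-- B's first loop: k = number of multiplications by factor taking a = lower to >= upper (fueled)
def pvCountB (fuel : Nat) (a : Int) (upper : Int) (factor : Int) (k : Int) : Int :=
  match fuel with
  | 0 => k
  | fuel + 1 =>
    if a < upper then pvCountB fuel (a * factor) upper factor (k + 1) else k

-- B's second loop: count ceil-halvings of k down to <= 1 (fueled)
def pvHalveB (fuel : Nat) (k : Int) (cnt : Int) : Int :=
  match fuel with
  | 0 => cnt
  | fuel + 1 =>
    if k > 1 then pvHalveB fuel (PySem.Int.floordiv (k + 1) 2) (cnt + 1) else cnt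

def getMinimumTestCnt_alt (lower : Int) (upper : Int) (factor : Int) : Int :=
  pvHalveB 100 (pvCountB 100 lower upper factor 0) 0

-- ===== PRECONDITION & SPEC =====
-- Pre_ excludes the inputs with lower < 1 or factor < 2 on which A's first guard fails: there A
-- raises ZeroDivisionError (factor = 0) or diverges (e.g. lower = 0 or factor = 1), except on a
-- negative-factor corner (e.g. (2,5,-2)) where A's termination and value are accidents of
-- floor-division sign behaviour outside the problem's domain (lower ≥ 1, factor ≥ 2) and B's
-- natural count loop returns a different value.
def Pre_getMinimumTestCnt (lower : Int) (upper : Int) (factor : Int) : Prop :=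
  lower * factor ≥ upper ∨ (1 ≤ lower ∧ 2 ≤ factor)
instance (lower : Int) (upper : Int) (factor : Int) : Decidable (Pre_getMinimumTestCnt lower upper factor) := by
  unfold Pre_getMinimumTestCnt; infer_instance

def pvWitness_getMinimumTestCnt : Int × Int × Int := (1, 10, 2)

def Spec_getMinimumTestCnt (lower : Int) (upper : Int) (factor : Int) (out : Int) : Prop := out = getMinimumTestCnt_alt lower upper factor
instance (lower : Int) (upper : Int) (factor : Int) (out : Int) : Decidable (Spec_getMinimumTestCnt lower upper factor out) := by unfold Spec_getMinimumTestCnt; infer_instance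

-- ===== CLAIM (what is proved, stated in full; the proofs are below) =====
def Claim_equal_getMinimumTestCnt : Prop := ∀ (lower : Int) (upper : Int) (factor : Int), Dom_getMinimumTestCnt lower upper factor → Pre_getMinimumTestCnt lower upper factor → Spec_getMinimumTestCnt lower upper factor (getMinimumTestCnt lower upper factor)

-- ===== LEMMAS AND PROOFS =====

-- ceiling division as computed inline by A's inner loop
def pvCdiv (u f : Int) : Int :=
  let t := PySem.Int.floordiv u f
  if PySem.Int.mod u f > 0 then t + 1 else t

-- k(a,u,f): minimal m with a * f^m ≥ u, as a guarded well-founded recursion (0 off the domain)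
def pvK (a u f : Int) : Nat :=
  if h : 1 ≤ a ∧ 2 ≤ f ∧ a < u then pvK (a * f) u f + 1 else 0
termination_by (u - a).toNat
decreasing_by
  have h1 : a + 1 ≤ a * f := by nlinarith [h.1, h.2.1, h.2.2]
  omega

-- H(k): number of ceil-halvings of k down to ≤ 1
def pvH (k : Nat) : Nat :=
  if k ≤ 1 then 0 else pvH ((k + 1) / 2) + 1
termination_by k
decreasing_by omega

theorem pvH_le (k : Nat) : pvH k ≤ k := by
  induction k using Nat.strong_induction_on with
  | _ k ih =>
    rw [pvH]
    split_ifs with h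
    · omega
    · have := ih ((k + 1) / 2) (by omega)
      omega

theorem pvH_eq_zero_iff (k : Nat) : pvH k = 0 ↔ k ≤ 1 := by
  rw [pvH]; split_ifs with h <;> simp [h]

-- step lemmas unfolding one literal unit of fuel
theorem pvInnerA_step (n : Nat) (a u f : Int) :
    pvInnerA (n + 1) a u f = if a < u then pvInnerA n (a * f) (pvCdiv u f) f else (a, u) := rfl

theorem pvRecA_step (n : Nat) (l u f : Int) :
    pvRecA (n + 1) l u f =
      if l * f ≥ u then 0 else pvRecA n l (pvInnerA 100 l u f).1 f + 1 := rfl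

theorem pvCountB_step (n : Nat) (a u f k : Int) :
    pvCountB (n + 1) a u f k = if a < u then pvCountB n (a * f) u f (k + 1) else k := rfl

theorem pvHalveB_step (n : Nat) (k c : Int) :
    pvHalveB (n + 1) k c = if k > 1 then pvHalveB n (PySem.Int.floordiv (k + 1) 2) (c + 1) else c := rfl

-- n < ⌈u/f⌉ ↔ n*f < u (for f ≥ 2)
theorem lt_pvCdiv (f : Int) (hf : 2 ≤ f) (n u : Int) : n < pvCdiv u f ↔ n * f < u := by
  have hfpos : (0 : Int) < f := by omega
  have hmod : PySem.Int.mod u f = u % f := PySem.Int.mod_eq_emod_of_pos hfpos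
  have hqr : PySem.Int.floordiv u f * f + PySem.Int.mod u f = u := PySem.Int.floordiv_mul_add_mod u f
  have hr0 : 0 ≤ PySem.Int.mod u f := by rw [hmod]; exact Int.emod_nonneg u (by omega)
  have hrf : PySem.Int.mod u f < f := by rw [hmod]; exact Int.emod_lt_of_pos u hfpos
  unfold pvCdiv
  split_ifs with h
  · constructor
    · intro hn; nlinarith
    · intro hn; nlinarith
  · have hr : PySem.Int.mod u f = 0 := by omega
    constructor
    · intro hn; nlinarith
    · intro hn; nlinarith

-- one simultaneous inner-loop step removes two from k
theorem pvK_step2 (f : Int) (hf : 2 ≤ f) :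
    ∀ n a u, (u - a).toNat = n → 1 ≤ a → pvK (a * f) (pvCdiv u f) f = pvK a u f - 2 := by
  intro n
  induction n using Nat.strong_induction_on with
  | _ n ih =>
    intro a u hn ha
    have haf : 1 ≤ a * f := by nlinarith
    by_cases h1 : a < u
    · by_cases h2 : a * f < u
      · have haff : 1 ≤ a * f * f := by nlinarith
        by_cases h3 : a * f * f < u
        · -- recursive case
          have hcond : a * f < pvCdiv u f := (lt_pvCdiv f hf _ u).mpr h3
          have hlt : a + 1 ≤ a * f := by nlinarith
          have hrec := ih ((u - a * f).toNat) (by omega) (a * f) u rfl haf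
          have hL : pvK (a * f) (pvCdiv u f) f = pvK (a * f * f) (pvCdiv u f) f + 1 := by
            rw [pvK]; rw [dif_pos ⟨haf, hf, hcond⟩]
          have hk1 : pvK a u f = pvK (a * f) u f + 1 := by
            rw [pvK]; rw [dif_pos ⟨ha, hf, h1⟩]
          have hk2 : pvK (a * f) u f = pvK (a * f * f) u f + 1 := by
            rw [pvK]; rw [dif_pos ⟨haf, hf, h2⟩]
          have hk3 : 1 ≤ pvK (a * f * f) u f := by
            rw [pvK]; rw [dif_pos ⟨haff, hf, h3⟩]; omega
          omega
        · -- loop about to stop after this step: both sides 0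
          have hcond : ¬ a * f < pvCdiv u f := by
            rw [lt_pvCdiv f hf]; exact h3
          have hL : pvK (a * f) (pvCdiv u f) f = 0 := by
            rw [pvK]; rw [dif_neg (by tauto)]
          have hk1 : pvK a u f = pvK (a * f) u f + 1 := by
            rw [pvK]; rw [dif_pos ⟨ha, hf, h1⟩]
          have hk2 : pvK (a * f) u f = pvK (a * f * f) u f + 1 := by
            rw [pvK]; rw [dif_pos ⟨haf, hf, h2⟩]
          have hk3 : pvK (a * f * f) u f = 0 := by
            rw [pvK]; rw [dif_neg (by tauto)]
          omega
      · -- k = 1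
        have h3 : ¬ a * f * f < u := by nlinarith
        have hcond : ¬ a * f < pvCdiv u f := by rw [lt_pvCdiv f hf]; exact h3
        have hL : pvK (a * f) (pvCdiv u f) f = 0 := by
          rw [pvK]; rw [dif_neg (by tauto)]
        have hk1 : pvK a u f = pvK (a * f) u f + 1 := by
          rw [pvK]; rw [dif_pos ⟨ha, hf, h1⟩]
        have hk2 : pvK (a * f) u f = 0 := by
          rw [pvK]; rw [dif_neg (by tauto)]
        omega
    · -- k = 0
      have h3 : ¬ a * f * f < u := by nlinarith
      have hcond : ¬ a * f < pvCdiv u f := by rw [lt_pvCdiv f hf]; exact h3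
      have hL : pvK (a * f) (pvCdiv u f) f = 0 := by
        rw [pvK]; rw [dif_neg (by tauto)]
      have hk : pvK a u f = 0 := by
        rw [pvK]; rw [dif_neg (by tauto)]
      omega

-- A's inner loop ends with a = a₀ * f^⌈k/2⌉
theorem pvInnerA_spec (f : Int) (hf : 2 ≤ f) :
    ∀ fuel a u, 1 ≤ a → (pvK a u f + 1) / 2 ≤ fuel →
      (pvInnerA fuel a u f).1 = a * f ^ ((pvK a u f + 1) / 2) := by
  intro fuel
  induction fuel with
  | zero =>
    intro a u ha hfuel
    have hk : pvK a u f = 0 := by omega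
    simp [pvInnerA, hk]
  | succ n ih =>
    intro a u ha hfuel
    rw [pvInnerA_step]
    by_cases h1 : a < u
    · rw [if_pos h1]
      have hk1 : 1 ≤ pvK a u f := by
        rw [pvK]; rw [dif_pos ⟨ha, hf, h1⟩]; omega
      have hstep : pvK (a * f) (pvCdiv u f) f = pvK a u f - 2 :=
        pvK_step2 f hf _ a u rfl ha
      have haf : 1 ≤ a * f := by nlinarith
      have hfuel' : (pvK (a * f) (pvCdiv u f) f + 1) / 2 ≤ n := by omega
      rw [ih (a * f) (pvCdiv u f) haf hfuel', hstep]
      have hexp : (pvK a u f - 2 + 1) / 2 + 1 = (pvK a u f + 1) / 2 := by omega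
      rw [mul_assoc, ← pow_succ']
      rw [hexp]
    · rw [if_neg h1]
      have hk : pvK a u f = 0 := by
        rw [pvK]; rw [dif_neg (by tauto)]
      simp [hk]

-- k of an exact power: pvK a (a*f^t) f = t
theorem pvK_pow (f : Int) (hf : 2 ≤ f) :
    ∀ t a, 1 ≤ a → pvK a (a * f ^ t) f = t := by
  intro t
  induction t with
  | zero =>
    intro a ha
    rw [pvK]; rw [dif_neg (by simp)]
  | succ t ih =>
    intro a ha
    have hp2 : (2 : Int) ≤ f ^ (t + 1) := by
      calc (2 : Int) = 2 ^ 1 := by norm_num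
        _ ≤ 2 ^ (t + 1) := by
            exact pow_le_pow_right₀ (by norm_num) (by omega)
        _ ≤ f ^ (t + 1) := pow_le_pow_left₀ (by norm_num) hf _
    have h1 : a < a * f ^ (t + 1) := by nlinarith
    rw [pvK]; rw [dif_pos ⟨ha, hf, h1⟩]
    have : a * f ^ (t + 1) = a * f * f ^ t := by ring
    rw [this, ih (a * f) (by nlinarith)]

-- upper bound on k from a covering power
theorem pvK_le (f : Int) (hf : 2 ≤ f) :
    ∀ m a u, 1 ≤ a → u ≤ a * f ^ m → pvK a u f ≤ m := by
  intro m
  induction m with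
  | zero =>
    intro a u ha hb
    simp at hb
    rw [pvK]; rw [dif_neg (by omega)]
  | succ m ih =>
    intro a u ha hb
    rw [pvK]
    split_ifs with h
    · have hrw : a * f ^ (m + 1) = a * f * f ^ m := by ring
      have hb' : u ≤ a * f * f ^ m := by rw [← hrw]; exact hb
      exact Nat.succ_le_succ (ih (a * f) u (by nlinarith) hb')
    · exact Nat.zero_le _

-- A's guard ⟺ k ≤ 1
theorem pvK_le_one_iff (l u f : Int) (hl : 1 ≤ l) (hf : 2 ≤ f) :
    u ≤ l * f ↔ pvK l u f ≤ 1 := by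
  by_cases hlu : l < u
  · rw [pvK]; rw [dif_pos ⟨hl, hf, hlu⟩]
    by_cases hlf : l * f < u
    · have : 1 ≤ pvK (l * f) u f := by
        rw [pvK]; rw [dif_pos ⟨by nlinarith, hf, hlf⟩]; omega
      constructor
      · intro h; omega
      · intro h; omega
    · have : pvK (l * f) u f = 0 := by
        rw [pvK]; rw [dif_neg (by tauto)]
      constructor
      · intro _; omega
      · intro _; omega
  · have h0 : pvK l u f = 0 := by rw [pvK]; rw [dif_neg (by tauto)]
    constructor
    · intro _; omega
    · intro _; nlinarith [not_lt.mp hlu]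

-- A's recursion computes H(k)
theorem pvRecA_spec (f : Int) (hf : 2 ≤ f) :
    ∀ fuel l u, 1 ≤ l → pvH (pvK l u f) ≤ fuel → pvK l u f ≤ 100 →
      pvRecA fuel l u f = (pvH (pvK l u f) : Int) := by
  intro fuel
  induction fuel with
  | zero =>
    intro l u hl hfuel _
    have h0 : pvH (pvK l u f) = 0 := by omega
    simp [pvRecA, h0]
  | succ n ih =>
    intro l u hl hfuel hk100
    rw [pvRecA_step]
    by_cases hg : l * f ≥ u
    · rw [if_pos hg]
      have : pvK l u f ≤ 1 := (pvK_le_one_iff l u f hl hf).mp hg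
      have : pvH (pvK l u f) = 0 := (pvH_eq_zero_iff _).mpr this
      omega
    · rw [if_neg hg]
      have hk2 : 2 ≤ pvK l u f := by
        by_contra hc
        exact hg ((pvK_le_one_iff l u f hl hf).mpr (by omega))
      set k := pvK l u f with hkdef
      have ht : (k + 1) / 2 ≤ 100 := by omega
      have ha' : (pvInnerA 100 l u f).1 = l * f ^ ((k + 1) / 2) :=
        pvInnerA_spec f hf 100 l u hl ht
      rw [ha']
      have hknew : pvK l (l * f ^ ((k + 1) / 2)) f = (k + 1) / 2 :=
        pvK_pow f hf _ l hl
      have hH : pvH k = pvH ((k + 1) / 2) + 1 := by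
        rw [pvH]; rw [if_neg (by omega)]
      rw [ih l (l * f ^ ((k + 1) / 2)) hl
        (by rw [hknew]; omega) (by rw [hknew]; omega), hknew]
      rw [hH]; push_cast; ring

-- B's count loop computes k
theorem pvCountB_spec (f : Int) (hf : 2 ≤ f) :
    ∀ fuel a u k, 1 ≤ a → pvK a u f ≤ fuel →
      pvCountB fuel a u f k = k + (pvK a u f : Int) := by
  intro fuel
  induction fuel with
  | zero =>
    intro a u k ha hfuel
    have : pvK a u f = 0 := by omega
    simp [pvCountB, this]
  | succ n ih =>
    intro a u k ha hfuel
    rw [pvCountB_step]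
    by_cases h1 : a < u
    · rw [if_pos h1]
      have hk : pvK a u f = pvK (a * f) u f + 1 := by
        rw [pvK]; rw [dif_pos ⟨ha, hf, h1⟩]
      rw [ih (a * f) u (k + 1) (by nlinarith) (by omega)]
      rw [hk]; push_cast; ring
    · rw [if_neg h1]
      have : pvK a u f = 0 := by rw [pvK]; rw [dif_neg (by tauto)]
      simp [this]

-- B's halving loop computes H(k)
theorem pvHalveB_spec :
    ∀ fuel (k c : Int), 0 ≤ k → pvH k.toNat ≤ fuel →
      pvHalveB fuel k c = c + (pvH k.toNat : Int) := by
  intro fuel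
  induction fuel with
  | zero =>
    intro k c hk hfuel
    have : pvH k.toNat = 0 := by omega
    simp [pvHalveB, this]
  | succ n ih =>
    intro k c hk hfuel
    rw [pvHalveB_step]
    by_cases h1 : k > 1
    · rw [if_pos h1]
      have hfd : PySem.Int.floordiv (k + 1) 2 = (k + 1) / 2 :=
        PySem.Int.floordiv_eq_ediv_of_pos (by norm_num)
      have hH : pvH k.toNat = pvH ((k.toNat + 1) / 2) + 1 := by
        rw [pvH]; rw [if_neg (by omega)]
      have htn : ((k + 1) / 2).toNat = (k.toNat + 1) / 2 := by omega
      rw [hfd, ih ((k + 1) / 2) (c + 1) (by omega) (by rw [htn]; omega)]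
      rw [htn, hH]; push_cast; ring
    · rw [if_neg h1]
      have : pvH k.toNat = 0 := (pvH_eq_zero_iff _).mpr (by omega)
      simp [this]

-- ===== VERDICT (by name: the statement is the Claim_ definition above) =====
theorem getMinimumTestCnt_spec : Claim_equal_getMinimumTestCnt := by
  intro lower upper factor hdom hpre
  unfold Spec_getMinimumTestCnt getMinimumTestCnt getMinimumTestCnt_alt
  by_cases hmain : 1 ≤ lower ∧ 2 ≤ factor
  · obtain ⟨hl, hf⟩ := hmain
    -- bound k ≤ 31 from Dom
    have hdom' : upper ≤ 2147483648 := by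
      unfold Dom_getMinimumTestCnt pvDomInt at hdom
      simp only [Bool.and_eq_true, decide_eq_true_eq] at hdom
      omega
    have hpow : (2147483648 : Int) ≤ lower * factor ^ 31 := by
      have h1 : (2 : Int) ^ 31 ≤ factor ^ 31 := pow_le_pow_left₀ (by norm_num) hf _
      have h2 : factor ^ 31 ≤ lower * factor ^ 31 := by nlinarith [pow_pos (show (0:Int) < factor by omega) 31]
      norm_num at h1 ⊢
      omega
    have hk31 : pvK lower upper factor ≤ 31 :=
      pvK_le factor hf 31 lower upper hl (by omega)
    have hH : pvH (pvK lower upper factor) ≤ 31 :=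
      le_trans (pvH_le _) hk31
    rw [pvRecA_spec factor hf 100 lower upper hl (by omega) (by omega)]
    rw [pvCountB_spec factor hf 100 lower upper 0 hl (by omega)]
    rw [pvHalveB_spec 100 (0 + (pvK lower upper factor : Int)) 0 (by positivity)
      (by simp; omega)]
    simp
  · -- degenerate but terminating corner: the guard holds, both sides are 0
    have hg : lower * factor ≥ upper := by
      rcases hpre with h | h
      · exact h
      · exact absurd h hmain
    rw [show (100 : Nat) = 99 + 1 from rfl]
    rw [pvRecA_step, if_pos hg, pvCountB_step]
    by_cases h1 : lower < upper
    · rw [if_pos h1]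
      rw [show (99 : Nat) = 98 + 1 from rfl, pvCountB_step, if_neg (by omega)]
      rw [pvHalveB_step, if_neg (by omega)]
    · rw [if_neg h1]
      rw [pvHalveB_step, if_neg (by omega)]
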